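-- pv_equiv track=rewrite | github.com/SwarmguardHQ/mcp-backend | agent/agent/state.py | _merge_active_relays
-- ===== SOURCE A (Python) =====
-- from typing import TypedDict, List, Dict, Any, Optional, Annotated
--
-- def _merge_active_relays(old: Dict[str, str], new: Dict[str, Optional[str]]) -> Dict[str, str]:
--     """
--     Merge relay maps — each drone only writes its own main-drone key,
--     so conflicts are impossible. Deletions use None as a sentinel value.
--     """
--     merged = {**old}
--     for k, v in new.items():
--         if v is None:
--             merged.pop(k, None)
--         else:
--             merged[k] = v
--     return merged
-- ===== SOURCE B (Python) =====
-- def _merge_active_relays(old, new):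
--     """Rebuild the result directly by lookup instead of copy-and-mutate:
--     walk `old` once, deciding each key's fate by looking it up in `new`
--     (overridden, deleted, or kept), then append `new`'s fresh non-None
--     entries.  No dict copy, no pop/delete operations at all."""
--     out = {}
--     for k, ov in old.items():
--         if k in new:
--             nv = new[k]
--             if nv is not None:
--                 out[k] = nv
--         else:
--             out[k] = ov
--     for k, nv in new.items():
--         if nv is not None and k not in old:
--             out[k] = nv
--     return out
-- ===== Notes on version B (the rewrite author's own statement) =====
-- stated objective: alternative
-- what changed: A copies old and mutates the copy per new-entry (assign or pop); B never deletes: it rebuilds the output from scratch, deciding each old key's fate by lookup in new, then appending new's fresh non-None entries.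
import Mathlib
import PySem

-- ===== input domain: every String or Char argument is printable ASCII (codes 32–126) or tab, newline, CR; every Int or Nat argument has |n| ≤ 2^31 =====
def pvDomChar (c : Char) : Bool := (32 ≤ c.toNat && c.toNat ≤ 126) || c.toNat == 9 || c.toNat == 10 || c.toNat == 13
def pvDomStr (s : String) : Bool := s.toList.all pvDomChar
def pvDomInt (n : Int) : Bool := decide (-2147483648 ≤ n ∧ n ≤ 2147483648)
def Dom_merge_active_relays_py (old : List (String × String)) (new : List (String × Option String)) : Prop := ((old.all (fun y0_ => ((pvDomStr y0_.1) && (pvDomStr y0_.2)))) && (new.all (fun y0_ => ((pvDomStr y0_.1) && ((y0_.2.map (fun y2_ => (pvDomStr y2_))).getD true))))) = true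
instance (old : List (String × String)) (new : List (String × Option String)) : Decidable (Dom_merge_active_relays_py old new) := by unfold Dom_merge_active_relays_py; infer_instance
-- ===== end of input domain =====

-- ===== PORT A =====
-- B rebuilds the output by lookup (decide each old key's fate from new, then append new's fresh
-- non-None entries) instead of A's copy-then-mutate with pop (objective: alternative; same cost).
def merge_active_relays_py (old : List (String × String)) (new : List (String × Option String)) : List (String × String) :=
  -- merged = {**old}
  let merged : PySem.Dict String String := PySem.Dict.ofList old
  -- for k, v in new.items(): if v is None: merged.pop(k, None)  else: merged[k] = v
  (new.foldl (fun m kv =>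
      match kv.2 with
      | none => m.erase kv.1
      | some v => m.insert kv.1 v) merged).items

-- ===== PORT B =====
def merge_active_relays_py_alt (old : List (String × String)) (new : List (String × Option String)) : List (String × String) :=
  let dnew : PySem.Dict String (Option String) := PySem.Dict.ofList new
  let dold : PySem.Dict String String := PySem.Dict.ofList old
  -- out = {}; for k, ov in old.items(): if k in new: (nv = new[k]; if nv is not None: out[k] = nv) else: out[k] = ov
  let out1 : PySem.Dict String String :=
    old.foldl (fun out kv =>
      match dnew.get? kv.1 with
      | some nv =>
          match nv with
          | some v => out.insert kv.1 v
          | none => out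
      | none => out.insert kv.1 kv.2) PySem.Dict.empty
  -- for k, nv in new.items(): if nv is not None and k not in old: out[k] = nv
  (new.foldl (fun out kv =>
      match kv.2 with
      | some v => if dold.contains kv.1 then out else out.insert kv.1 v
      | none => out) out1).items

-- ===== PRECONDITION & SPEC =====
-- Pre_ only excludes association lists whose keys repeat: such a list encodes no Python dict
-- (dict keys are unique), so no Python input is excluded; on duplicated keys the list-level
-- foldings of the two ports legitimately differ.
def Pre_merge_active_relays_py (old : List (String × String)) (new : List (String × Option String)) : Prop :=
  (old.map Prod.fst).Nodup ∧ (new.map Prod.fst).Nodup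
instance (old : List (String × String)) (new : List (String × Option String)) : Decidable (Pre_merge_active_relays_py old new) := by unfold Pre_merge_active_relays_py; infer_instance

def pvWitness_merge_active_relays_py : (List (String × String)) × (List (String × Option String)) :=
  ([("a", "1"), ("c", "3")], [("a", none), ("b", some "2")])

def Spec_merge_active_relays_py (old : List (String × String)) (new : List (String × Option String)) (out : List (String × String)) : Prop := out = merge_active_relays_py_alt old new
instance (old : List (String × String)) (new : List (String × Option String)) (out : List (String × String)) : Decidable (Spec_merge_active_relays_py old new out) := by unfold Spec_merge_active_relays_py; infer_instance

-- ===== CLAIM (what is proved, stated in full; the proofs are below) =====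
def Claim_equal_merge_active_relays_py : Prop := ∀ (old : List (String × String)) (new : List (String × Option String)), Dom_merge_active_relays_py old new → Pre_merge_active_relays_py old new → Spec_merge_active_relays_py old new (merge_active_relays_py old new)

-- ===== LEMMAS AND PROOFS =====

-- the per-old-pair transformation dictated by `new` (as the first-match assoc lookup Dict.mk new)
def pvG (new : List (String × Option String)) (p : String × String) : Option (String × String) :=
  match (PySem.Dict.mk new).get? p.1 with
  | none => some p
  | some none => none
  | some (some v) => some (p.1, v)

-- the fresh entries contributed by `new` given the old dict d
def pvH (d : PySem.Dict String String) (q : String × Option String) : Option (String × String) :=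
  match q.2 with
  | some v => if d.contains q.1 then none else some (q.1, v)
  | none => none

theorem pv_contains_erase_of_ne (d : PySem.Dict String String) (k k' : String) (h : k' ≠ k) :
    (d.erase k).contains k' = d.contains k' := by
  rw [Bool.eq_iff_iff]
  simp only [PySem.Dict.contains, PySem.Dict.erase, List.any_eq_true, List.mem_filter]
  constructor
  · rintro ⟨p, ⟨hp, _⟩, hk⟩; exact ⟨p, hp, hk⟩
  · rintro ⟨p, hp, hk⟩
    have hpk : p.1 = k' := by simpa using hk
    exact ⟨p, ⟨hp, by simp [hpk, h]⟩, hk⟩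

theorem pv_filterMap_filter_ne (l : List (String × String)) (k : String)
    (f : String × String → Option (String × String)) (hk : ∀ p : String × String, p.1 = k → f p = none) :
    (l.filter (fun p => !(p.1 == k))).filterMap f = l.filterMap f := by
  induction l with
  | nil => rfl
  | cons p t ih =>
    by_cases h : p.1 = k
    · simp [h, hk p h, ih]
    · simp [h, List.filterMap_cons, ih]

-- characterization of A's loop: the surviving old entries (transformed) then the fresh new entries
theorem pv_A_char (new : List (String × Option String)) (d : PySem.Dict String String)
    (hn : (new.map Prod.fst).Nodup) :
    (new.foldl (fun m kv =>
        match kv.2 with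
        | none => m.erase kv.1
        | some v => m.insert kv.1 v) d).items
      = d.items.filterMap (pvG new) ++ new.filterMap (pvH d) := by
  induction new generalizing d with
  | nil =>
    simp only [List.foldl_nil, List.filterMap_nil, List.append_nil]
    rw [List.filterMap_eq_map_iff_forall_eq_some.mpr ?_, List.map_id]
    intro p _
    simp [pvG, PySem.Dict.get?]
  | cons q t ih =>
    obtain ⟨k, x⟩ := q
    simp only [List.map_cons, List.nodup_cons] at hn
    have hft : List.find? (fun p => p.1 == k) t = none := by
      rw [List.find?_eq_none]
      intro p hp hpk
      exact hn.1 (List.mem_map.mpr ⟨p, hp, by simpa using hpk⟩)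
    have hkt : (PySem.Dict.mk t).get? k = none := by
      simp [PySem.Dict.get?, hft]
    have hGt : ∀ p : String × String, p.1 ≠ k → pvG ((k, x) :: t) p = pvG t p := by
      intro p hpk
      simp [pvG, PySem.Dict.get?, beq_iff_eq, Ne.symm hpk]
    cases x with
    | some v =>
      simp only [List.foldl_cons]
      rw [ih _ hn.2]
      by_cases hc : d.contains k = true
      · rw [PySem.Dict.items_insert_of_contains _ _ hc]
        congr 1
        · rw [List.filterMap_map]
          apply List.filterMap_congr
          intro p _
          by_cases hpk : p.1 = k
          · simp only [Function.comp_apply, hpk, beq_self_eq_true, if_pos]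
            simp [pvG, PySem.Dict.get?, hft, hpk]
          · simp only [Function.comp_apply, beq_iff_eq, hpk, if_neg, not_false_iff]
            exact (hGt p hpk).symm
        · simp only [List.filterMap_cons, pvH, hc, if_pos]
          apply List.filterMap_congr
          intro q hq
          have hqk : q.1 ≠ k := fun h => hn.1 (h ▸ List.mem_map_of_mem hq)
          simp [PySem.Dict.contains_insert, hqk]
      · rw [PySem.Dict.items_insert_of_not_contains _ _ (by simpa using hc)]
        rw [List.filterMap_append]
        have hGk : pvG t (k, v) = some (k, v) := by simp [pvG, hkt]
        simp only [List.filterMap_cons, hGk]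
        have h1 : d.items.filterMap (pvG t) = d.items.filterMap (pvG ((k, some v) :: t)) := by
          apply List.filterMap_congr
          intro p hp
          have hpk : p.1 ≠ k := by
            intro h
            have : d.contains k = true := by
              simp only [PySem.Dict.contains, List.any_eq_true]
              exact ⟨p, hp, by simp [h]⟩
            simp [this] at hc
          exact (hGt p hpk).symm
        have h2 : t.filterMap (pvH (d.insert k v)) = t.filterMap (pvH d) := by
          apply List.filterMap_congr
          intro q hq
          have hqk : q.1 ≠ k := fun h => hn.1 (h ▸ List.mem_map_of_mem hq)
          simp [pvH, PySem.Dict.contains_insert, hqk]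
        rw [h1, h2]
        simp only [pvH, hc]
        simp
    | none =>
      simp only [List.foldl_cons]
      rw [ih _ hn.2]
      have herase : (d.erase k).items = d.items.filter (fun p => !(p.1 == k)) := rfl
      have h1 : (d.erase k).items.filterMap (pvG t) = d.items.filterMap (pvG ((k, none) :: t)) := by
        rw [herase]
        rw [List.filterMap_congr (l := d.items.filter (fun p => !(p.1 == k)))
              (f := pvG t) (g := pvG ((k, none) :: t)) ?_]
        · exact pv_filterMap_filter_ne d.items k _ (fun p hpk => by
            simp [pvG, PySem.Dict.get?, hpk])
        · intro p hp
          have hpk : p.1 ≠ k := by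
            have := (List.mem_filter.mp hp).2
            simpa using this
          exact (hGt p hpk).symm
      have h2 : t.filterMap (pvH (d.erase k)) = t.filterMap (pvH d) := by
        apply List.filterMap_congr
        intro q hq
        have hqk : q.1 ≠ k := fun h => hn.1 (h ▸ List.mem_map_of_mem hq)
        simp [pvH, pv_contains_erase_of_ne d k q.1 hqk]
      rw [h1, h2]
      simp [pvH]

-- a fold that inserts or skips equals a plain insert-fold over the filterMap of selected pairs
theorem pv_fold_skip_eq (new : List (String × Option String)) (old : List (String × String))
    (out : PySem.Dict String String) :
    old.foldl (fun out kv =>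
        match (PySem.Dict.mk new).get? kv.1 with
        | some nv => match nv with
                     | some v => out.insert kv.1 v
                     | none => out
        | none => out.insert kv.1 kv.2) out
      = (old.filterMap (pvG new)).foldl (fun out p => out.insert p.1 p.2) out := by
  induction old generalizing out with
  | nil => rfl
  | cons p t ih =>
    simp only [List.foldl_cons, List.filterMap_cons]
    cases hg : (PySem.Dict.mk new).get? p.1 with
    | none =>
      have hG : pvG new p = some p := by simp [pvG, hg]
      rw [hG]; simp only [List.foldl_cons]; rw [ih]
    | some nv =>
      cases nv with
      | none =>
        have hG : pvG new p = none := by simp [pvG, hg]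
        rw [hG]; rw [ih]
      | some v =>
        have hG : pvG new p = some (p.1, v) := by simp [pvG, hg]
        rw [hG]; simp only [List.foldl_cons]; rw [ih]

theorem pv_fold_skip2_eq (new : List (String × Option String)) (dold : PySem.Dict String String)
    (out : PySem.Dict String String) :
    new.foldl (fun out kv =>
        match kv.2 with
        | some v => if dold.contains kv.1 then out else out.insert kv.1 v
        | none => out) out
      = (new.filterMap (pvH dold)).foldl (fun out p => out.insert p.1 p.2) out := by
  induction new generalizing out with
  | nil => rfl
  | cons q t ih =>
    simp only [List.foldl_cons, List.filterMap_cons]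
    cases hq : q.2 with
    | none =>
      have hH : pvH dold q = none := by simp [pvH, hq]
      rw [hH]; rw [ih]
    | some v =>
      by_cases hc : dold.contains q.1 = true
      · have hH : pvH dold q = none := by simp [pvH, hq, hc]
        rw [hH]; simp only [hc, if_pos]; rw [ih]
      · have hH : pvH dold q = some (q.1, v) := by simp [pvH, hq, hc]
        rw [hH]; simp only [eq_false_of_ne_true hc, Bool.false_eq_true,
          if_false, List.foldl_cons]
        rw [ih]

theorem pv_keys_filterMap_G_sublist (new : List (String × Option String)) (old : List (String × String)) :
    ((old.filterMap (pvG new)).map Prod.fst).Sublist (old.map Prod.fst) := by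
  induction old with
  | nil => simp
  | cons p t ih =>
    cases hg : pvG new p with
    | none => simpa [List.filterMap_cons, hg] using ih.trans (List.sublist_cons_self _ _)
    | some r =>
      have hr : r.1 = p.1 := by
        simp only [pvG] at hg
        rcases h : (PySem.Dict.mk new).get? p.1 with _ | (_ | v) <;> rw [h] at hg
        · injection hg with hg; rw [← hg]
        · exact absurd hg (by simp)
        · injection hg with hg; rw [← hg]
      simpa [List.filterMap_cons, hg, hr] using ih.cons₂ p.1

theorem pv_keys_filterMap_H_sublist (d : PySem.Dict String String) (new : List (String × Option String)) :
    ((new.filterMap (pvH d)).map Prod.fst).Sublist (new.map Prod.fst) := by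
  induction new with
  | nil => simp
  | cons q t ih =>
    cases hg : pvH d q with
    | none => simpa [List.filterMap_cons, hg] using ih.trans (List.sublist_cons_self _ _)
    | some r =>
      have hr : r.1 = q.1 := by
        simp only [pvH] at hg
        rcases h : q.2 with _ | v <;> rw [h] at hg <;> dsimp only at hg
        · exact absurd hg (by simp)
        · by_cases hc : d.contains q.1 = true
          · rw [if_pos hc] at hg; exact absurd hg (by simp)
          · rw [if_neg hc] at hg
            injection hg with hg; rw [← hg]
      simpa [List.filterMap_cons, hg, hr] using ih.cons₂ q.1

theorem pv_mk_ofList {ν : Type} (l : List (String × ν)) (h : (l.map Prod.fst).Nodup) :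
    (PySem.Dict.ofList l : PySem.Dict String ν) = PySem.Dict.mk l := by
  apply PySem.Dict.ext
  have := PySem.Dict.items_foldl_insert_fresh l (fun p => p.1) (fun p => p.2) PySem.Dict.empty
    (by intro a _; simp [PySem.Dict.empty, PySem.Dict.contains]) h
  simpa [PySem.Dict.ofList, PySem.Dict.update, PySem.Dict.empty] using this

-- ===== VERDICT (by name: the statement is the Claim_ definition above) =====
theorem merge_active_relays_py_spec : Claim_equal_merge_active_relays_py := by
  intro old new _ hpre
  obtain ⟨ho, hn⟩ := hpre
  unfold Spec_merge_active_relays_py merge_active_relays_py merge_active_relays_py_alt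
  simp only
  rw [pv_mk_ofList old ho, pv_mk_ofList new hn]
  -- A's side by the characterization
  rw [pv_A_char new (PySem.Dict.mk old) hn]
  -- B's side: both folds become insert-folds over filterMaps
  rw [pv_fold_skip_eq new old PySem.Dict.empty, pv_fold_skip2_eq new (PySem.Dict.mk old)]
  -- first insert-fold: fresh distinct keys appended to the empty dict
  have hGnd : ((old.filterMap (pvG new)).map Prod.fst).Nodup :=
    ho.sublist (pv_keys_filterMap_G_sublist new old)
  have h1 := PySem.Dict.items_foldl_insert_fresh (old.filterMap (pvG new))
    (fun p => p.1) (fun p => p.2) PySem.Dict.empty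
    (by intro a _; simp [PySem.Dict.empty, PySem.Dict.contains]) hGnd
  have h1' : ((old.filterMap (pvG new)).foldl (fun out p => out.insert p.1 p.2)
      PySem.Dict.empty).items = old.filterMap (pvG new) := by
    simpa [PySem.Dict.empty] using h1
  -- second insert-fold: keys fresh w.r.t. the first dict (they are not keys of old)
  have hHnd : ((new.filterMap (pvH (PySem.Dict.mk old))).map Prod.fst).Nodup :=
    hn.sublist (pv_keys_filterMap_H_sublist _ new)
  have h2 := PySem.Dict.items_foldl_insert_fresh (new.filterMap (pvH (PySem.Dict.mk old)))
    (fun p => p.1) (fun p => p.2)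
    ((old.filterMap (pvG new)).foldl (fun out p => out.insert p.1 p.2) PySem.Dict.empty)
    ?_ hHnd
  · simpa [h1'] using h2.symm
  · intro a ha
    -- a's key is not a key of old, while the accumulated dict's keys all come from old
    have hak : (PySem.Dict.mk old).contains a.1 = false := by
      rcases List.mem_filterMap.mp ha with ⟨q, hq, hfa⟩
      simp only [pvH] at hfa
      rcases hx : q.2 with _ | v <;> rw [hx] at hfa <;> dsimp only at hfa
      · exact absurd hfa (by simp)
      · by_cases hc : (PySem.Dict.mk old).contains q.1 = true
        · rw [if_pos hc] at hfa; exact absurd hfa (by simp)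
        · rw [if_neg (by simpa using hc)] at hfa
          injection hfa with hfa
          rw [← hfa]
          exact eq_false_of_ne_true hc
    rw [Bool.eq_false_iff]
    intro hcon
    simp only [PySem.Dict.contains, List.any_eq_true, h1'] at hcon
    obtain ⟨p, hp, hpa⟩ := hcon
    have hpold : p.1 ∈ old.map Prod.fst :=
      (pv_keys_filterMap_G_sublist new old).mem (List.mem_map_of_mem hp)
    have : (PySem.Dict.mk old).contains a.1 = true := by
      simp only [PySem.Dict.contains, List.any_eq_true]
      rcases List.mem_map.mp hpold with ⟨r, hr, hrk⟩
      exact ⟨r, hr, by rw [hrk]; exact hpa⟩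
    rw [hak] at this; exact absurd this (by simp)
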